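-- pv_equiv track=rewrite | github.com/dcharua/code | Python/EncriSeguridadInfo/encripta.py | ECG
-- ===== SOURCE A (Python) =====
-- def cifrarBloque(bloque, llave):
--     cifrado=""
--     for i in range(0, 4):
--         cifrado+=chr(ord(bloque[i]) ^ llave[i])
--     return cifrado
--
-- def ECG(mensaje, llaveTexto):
--     if len(mensaje)%4!=0:
--         for i in range(0, 4-int(len(mensaje)%4)):
--             mensaje+="!"
--     llave=[]
--     for c in llaveTexto:
--         llave.append(ord(c))
--     cifrado=""
--     for i in range(0, int(len(mensaje)/4)):
--         cifrado+=cifrarBloque(mensaje[(i*4):(i*4)+4], llave)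
--     return cifrado
-- ===== SOURCE B (Python) =====
-- def ECG(mensaje, llaveTexto):
--     r = len(mensaje) % 4
--     if r != 0:
--         mensaje += "!" * (4 - r)
--     llave = [ord(c) for c in llaveTexto]
--     return "".join(chr(ord(ch) ^ llave[i % 4]) for i, ch in enumerate(mensaje))
-- ===== Notes on version B (the rewrite author's own statement) =====
-- stated objective: simpler
-- what changed: Replaces the nested block-outer/position-inner loops and the cifrarBloque helper with one flat pass over the padded message using modular key indexing (enumerate + i % 4).
import Mathlib
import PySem

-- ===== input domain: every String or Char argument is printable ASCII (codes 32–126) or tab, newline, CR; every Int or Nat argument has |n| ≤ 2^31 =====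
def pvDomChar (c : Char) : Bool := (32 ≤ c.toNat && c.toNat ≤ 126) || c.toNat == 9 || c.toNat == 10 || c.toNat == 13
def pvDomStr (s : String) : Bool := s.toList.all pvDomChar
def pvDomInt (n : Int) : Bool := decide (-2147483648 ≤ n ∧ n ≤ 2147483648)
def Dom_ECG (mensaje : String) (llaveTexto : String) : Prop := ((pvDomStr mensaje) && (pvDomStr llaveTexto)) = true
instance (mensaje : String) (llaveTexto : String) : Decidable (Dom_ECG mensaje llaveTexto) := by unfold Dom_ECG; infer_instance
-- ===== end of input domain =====

-- B replaces A's block-outer/position-inner loops and cifrarBloque helper by one flat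
-- pass over the padded message with modular key indexing (objective: simpler).

-- ===== PORT A =====
-- cifrarBloque: for i in range(4): cifrado += chr(ord(bloque[i]) ^ llave[i]).
-- bloque[i]/llave[i] are in range under Pre_ECG; getD stands for the indexing there.
def pvCifrarBloque (bloque : List Char) (llave : List Nat) : List Char :=
  (List.range 4).foldl
    (fun acc i => acc ++ [Char.ofNat ((bloque.getD i ' ').toNat ^^^ llave.getD i 0)]) []

-- Python slice mensaje[i*4 : i*4+4] with nonnegative in-order indices is exactly
-- (drop (i*4)).take 4; int(len/4) is exact integer division here.
def ECG (mensaje : String) (llaveTexto : String) : String :=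
  let m0 := mensaje.toList
  let m := if m0.length % 4 ≠ 0 then
      (List.range (4 - m0.length % 4)).foldl (fun acc _ => acc ++ ['!']) m0
    else m0
  let llave := llaveTexto.toList.foldl (fun acc c => acc ++ [c.toNat]) []
  String.mk ((List.range (m.length / 4)).foldl
    (fun acc i => acc ++ pvCifrarBloque ((m.drop (i*4)).take 4) llave) [])

-- ===== PORT B =====
-- llave[i % 4] is in range under Pre_ECG; getD stands for the indexing there.
def ECG_alt (mensaje : String) (llaveTexto : String) : String :=
  let r := mensaje.toList.length % 4
  let m := mensaje.toList ++ (if r ≠ 0 then List.replicate (4 - r) '!' else [])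
  let llave := llaveTexto.toList.map Char.toNat
  String.mk (m.mapIdx (fun i c => Char.ofNat (c.toNat ^^^ llave.getD (i % 4) 0)))

-- ===== PRECONDITION & SPEC =====
-- Pre_ excludes exactly the inputs where A raises IndexError: a nonempty message with a
-- key shorter than 4 characters (B raises there as well).
def Pre_ECG (mensaje : String) (llaveTexto : String) : Prop :=
  mensaje.toList.length = 0 ∨ 4 ≤ llaveTexto.toList.length
instance (mensaje : String) (llaveTexto : String) : Decidable (Pre_ECG mensaje llaveTexto) := by
  unfold Pre_ECG; infer_instance
def pvWitness_ECG : String × String := ("ab", "keyz")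

def Spec_ECG (mensaje : String) (llaveTexto : String) (out : String) : Prop := out = ECG_alt mensaje llaveTexto
instance (mensaje : String) (llaveTexto : String) (out : String) : Decidable (Spec_ECG mensaje llaveTexto out) := by unfold Spec_ECG; infer_instance

-- ===== CLAIM (what is proved, stated in full; the proofs are below) =====
def Claim_equal_ECG : Prop := ∀ (mensaje : String) (llaveTexto : String), Dom_ECG mensaje llaveTexto → Pre_ECG mensaje llaveTexto → Spec_ECG mensaje llaveTexto (ECG mensaje llaveTexto)

-- ===== LEMMAS AND PROOFS =====

theorem pv_pad_foldl (r : Nat) (m : List Char) :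
    (List.range r).foldl (fun acc _ => acc ++ ['!']) m = m ++ List.replicate r '!' := by
  induction r with
  | zero => simp
  | succ n ih => simp [List.range_succ, ih, List.replicate_succ']

theorem pv_key_foldl (l : List Char) (acc : List Nat) :
    l.foldl (fun acc c => acc ++ [c.toNat]) acc = acc ++ l.map Char.toNat := by
  induction l generalizing acc with
  | nil => simp
  | cons c t ih => simp [ih]

theorem pv_blocks_eq (llave : List Nat) :
    ∀ (k : Nat) (m : List Char), m.length = 4 * k →
    (List.range k).foldl (fun acc i => acc ++ pvCifrarBloque ((m.drop (i*4)).take 4) llave) []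
      = m.mapIdx (fun i c => Char.ofNat (c.toNat ^^^ llave.getD (i % 4) 0)) := by
  intro k
  induction k with
  | zero =>
    intro m hm
    have : m = [] := List.eq_nil_of_length_eq_zero (by omega)
    simp [this]
  | succ k ih =>
    intro m hm
    have hfk : (m.take (4*k)).length = 4*k := by
      rw [List.length_take]; omega
    -- the first k blocks only look at the first 4k characters
    have hsl : ∀ i ∈ List.range k,
        ((m.drop (i*4)).take 4) = (((m.take (4*k)).drop (i*4)).take 4) := by
      intro i hi
      have hik : i < k := List.mem_range.mp hi
      rw [List.drop_take, List.take_take]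
      congr 1
      omega
    -- fold over range (k+1) = fold over range k, then block k
    rw [List.range_succ, List.foldl_append]
    simp only [List.foldl_cons, List.foldl_nil]
    have hcongr :
        (List.range k).foldl (fun acc i => acc ++ pvCifrarBloque ((m.drop (i*4)).take 4) llave) []
          = (List.range k).foldl (fun acc i => acc ++ pvCifrarBloque (((m.take (4*k)).drop (i*4)).take 4) llave) [] := by
      apply PySem.List.foldl_congr_mem
      intro acc i hi
      rw [hsl i hi]
    have hback : (m.drop (4*k)).length = 4 := by
      rw [List.length_drop]; omega
    obtain ⟨b0, b1, b2, b3, hb⟩ : ∃ b0 b1 b2 b3, m.drop (4*k) = [b0, b1, b2, b3] := by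
      rcases hd : m.drop (4*k) with _ | ⟨a0, _ | ⟨a1, _ | ⟨a2, _ | ⟨a3, rest⟩⟩⟩⟩ <;>
        simp_all
    have hm2 : m = m.take (4*k) ++ [b0, b1, b2, b3] := by
      rw [← hb, List.take_append_drop]
    rw [hcongr, ih (m.take (4*k)) hfk]
    conv_rhs => rw [hm2]
    rw [List.mapIdx_append]
    congr 1
    · -- last block
      have h4 : k * 4 = 4 * k := by ring
      rw [h4, hb, hfk]
      simp [pvCifrarBloque, List.range_succ, List.mapIdx_cons, Nat.add_mul_mod_self_left]

theorem ECG_spec : Claim_equal_ECG := by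
  intro mensaje llaveTexto _ _
  unfold Spec_ECG ECG ECG_alt
  simp only [pv_key_foldl, List.nil_append]
  by_cases h : mensaje.toList.length % 4 = 0
  · simp only [h, ne_eq, not_true_eq_false, if_false,
      List.append_nil]
    congr 1
    exact pv_blocks_eq _ (mensaje.toList.length / 4) _ (by omega)
  · simp only [ne_eq, h, not_false_eq_true, if_true, pv_pad_foldl]
    congr 1
    have hlen : (mensaje.toList ++ List.replicate (4 - mensaje.toList.length % 4) '!').length
        = mensaje.toList.length + (4 - mensaje.toList.length % 4) := by simp
    rw [hlen]
    have hr : mensaje.toList.length % 4 < 4 := Nat.mod_lt _ (by omega)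
    exact pv_blocks_eq _ _ _ (by omega)
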